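-- pv_equiv track=rewrite | github.com/seungjaejeon/for_pccp | seungjae/5주차_유전법칙.py | solution
-- ===== SOURCE A (Python) =====
-- def solution(queries):
--     def find_trait(n, p):
--         if n == 1:  # 1세대는 항상 Rr
--             return "Rr"
--
--         parent_p = (p - 1) // 4 + 1   # 부모 인덱스
--         child_idx = (p - 1) % 4 + 1   # 부모의 몇 번째 자식인지
--
--         parent_trait = find_trait(n - 1, parent_p)
--
--         if parent_trait == "RR":
--             return "RR"
--         elif parent_trait == "rr":
--             return "rr"
--         else:  # Rr
--             if child_idx == 1:
--                 return "RR"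
--             elif child_idx in (2, 3):
--                 return "Rr"
--             else:
--                 return "rr"
--
--     return [find_trait(n, p) for n, p in queries]
-- ===== SOURCE B (Python) =====
-- def solution(queries):
--     res = []
--     for n, p in queries:
--         x = p - 1
--         digits = []
--         for _ in range(n - 1):
--             digits.append(x % 4)
--             x //= 4
--         trait = "Rr"
--         for d in reversed(digits):
--             if d == 0:
--                 trait = "RR"
--                 break
--             if d == 3:
--                 trait = "rr"
--                 break
--         res.append(trait)
--     return res
-- ===== Notes on version B (the rewrite author's own statement) =====
-- stated objective: alternative
-- what changed: Replaced the per-query top-down recursion over ancestors with an iterative extraction of the n-1 base-4 digits of p-1 and a most-significant-first scan returning at the first decisive digit (0 -> RR, 3 -> rr, default Rr); no Python call stack, and the scan stops at the first decisive ancestor.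
import Mathlib
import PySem

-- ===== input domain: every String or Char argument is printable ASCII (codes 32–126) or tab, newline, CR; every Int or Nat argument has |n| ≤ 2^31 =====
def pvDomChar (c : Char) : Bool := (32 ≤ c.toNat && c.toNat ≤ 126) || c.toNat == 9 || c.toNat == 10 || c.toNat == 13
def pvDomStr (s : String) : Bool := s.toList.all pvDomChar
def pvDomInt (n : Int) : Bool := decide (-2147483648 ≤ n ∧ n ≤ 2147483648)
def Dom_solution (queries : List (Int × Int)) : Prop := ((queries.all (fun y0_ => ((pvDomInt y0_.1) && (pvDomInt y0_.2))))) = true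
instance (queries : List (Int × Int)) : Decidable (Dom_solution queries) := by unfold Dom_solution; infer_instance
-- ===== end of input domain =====

-- B replaces A's per-query recursion over ancestors by iterative base-4 digit extraction of p-1
-- and a most-significant-first scan for the first decisive digit; same cost, no recursion.

-- ===== PORT A =====
-- find_trait(n, p); fuel = n.toNat steps suffice for n ≥ 1 (Pre_); fuel 0 is unreachable under Pre_
def findTraitGo : Nat → Int → Int → String
  | 0, _, _ => "Rr"
  | fuel + 1, n, p =>
    if n = 1 then "Rr"
    else
      let parentP := PySem.Int.floordiv (p - 1) 4 + 1
      let childIdx := PySem.Int.mod (p - 1) 4 + 1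
      let parentTrait := findTraitGo fuel (n - 1) parentP
      if parentTrait = "RR" then "RR"
      else if parentTrait = "rr" then "rr"
      else
        if childIdx = 1 then "RR"
        else if childIdx = 2 ∨ childIdx = 3 then "Rr"
        else "rr"

def solution (queries : List (Int × Int)) : List String :=
  queries.map (fun q => findTraitGo q.1.toNat q.1 q.2)

-- ===== PORT B =====
-- the loop 'for _ in range(n-1): digits.append(x % 4); x //= 4'
def collectDigits : Nat → Int → List Int
  | 0, _ => []
  | k + 1, x => PySem.Int.mod x 4 :: collectDigits k (PySem.Int.floordiv x 4)

-- the scan over reversed(digits) with early break; "Rr" if no decisive digit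
def scanDigits : List Int → String
  | [] => "Rr"
  | d :: rest => if d = 0 then "RR" else if d = 3 then "rr" else scanDigits rest

def solution_alt (queries : List (Int × Int)) : List String :=
  queries.map (fun q => scanDigits ((collectDigits (q.1 - 1).toNat (q.2 - 1)).reverse))

-- ===== PRECONDITION & SPEC =====
-- Pre_ excludes exactly the queries on which A RAISES: a generation n ≤ 0 (the recursion never
-- reaches its base case) or n > 9996 (recursion depth n exceeds the interpreter's recursion
-- limit, 10000 here) makes A raise RecursionError; A returns on every input Pre_ admits.
def Pre_solution (queries : List (Int × Int)) : Prop :=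
  ∀ q ∈ queries, 1 ≤ q.1 ∧ q.1 ≤ 9996
instance (queries : List (Int × Int)) : Decidable (Pre_solution queries) := by
  unfold Pre_solution; infer_instance

def pvWitness_solution : (List (Int × Int)) := [(1, 5), (3, 7), (3, 16), (2, -3)]

def Spec_solution (queries : List (Int × Int)) (out : List String) : Prop := out = solution_alt queries
instance (queries : List (Int × Int)) (out : List String) : Decidable (Spec_solution queries out) := by unfold Spec_solution; infer_instance

-- ===== CLAIM (what is proved, stated in full; the proofs are below) =====
def Claim_equal_solution : Prop := ∀ (queries : List (Int × Int)), Dom_solution queries → Pre_solution queries → Spec_solution queries (solution queries)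

-- ===== LEMMAS AND PROOFS =====

lemma scanDigits_cases (l : List Int) :
    scanDigits l = "RR" ∨ scanDigits l = "rr" ∨ scanDigits l = "Rr" := by
  induction l with
  | nil => simp [scanDigits]
  | cons d rest ih =>
    simp only [scanDigits]
    split_ifs <;> simp [ih]

lemma scanDigits_append (l : List Int) (d : Int) :
    scanDigits (l ++ [d]) =
      if scanDigits l = "RR" then "RR"
      else if scanDigits l = "rr" then "rr"
      else if d = 0 then "RR" else if d = 3 then "rr" else "Rr" := by
  induction l with
  | nil => simp [scanDigits]
  | cons e rest ih =>
    by_cases h1 : e = 0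
    · simp [scanDigits, h1]
    · by_cases h2 : e = 3
      · simp [scanDigits, h2]
      · simp [scanDigits, h1, h2, ih]

-- one step of A's recursion, unfolded (n ≠ 1)
lemma findTraitGo_succ (fuel : Nat) (n p : Int) (h : ¬ n = 1) :
    findTraitGo (fuel + 1) n p =
      (if findTraitGo fuel (n - 1) (PySem.Int.floordiv (p - 1) 4 + 1) = "RR" then "RR"
       else if findTraitGo fuel (n - 1) (PySem.Int.floordiv (p - 1) 4 + 1) = "rr" then "rr"
       else if PySem.Int.mod (p - 1) 4 + 1 = 1 then "RR"
       else if PySem.Int.mod (p - 1) 4 + 1 = 2 ∨ PySem.Int.mod (p - 1) 4 + 1 = 3 then "Rr"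
       else "rr") := by
  conv_lhs => rw [findTraitGo]
  simp only [h, if_false]

-- the core equivalence, fuel/generation in lockstep
lemma findTrait_eq_scan (k : Nat) (p : Int) :
    findTraitGo (k + 1) ((k : Int) + 1) p =
      scanDigits ((collectDigits k (p - 1)).reverse) := by
  induction k generalizing p with
  | zero => simp [findTraitGo, collectDigits, scanDigits]
  | succ k ih =>
    have hne : ¬ (((k : Nat) + 1 : Nat) : Int) + 1 = 1 := by push_cast; omega
    rw [findTraitGo_succ _ _ _ hne]
    have harg : ((((k : Nat) + 1 : Nat) : Int) + 1) - 1 = (k : Int) + 1 := by push_cast; ring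
    rw [harg, ih (PySem.Int.floordiv (p - 1) 4 + 1)]
    have hpp : PySem.Int.floordiv (p - 1) 4 + 1 - 1 = PySem.Int.floordiv (p - 1) 4 := by ring
    rw [hpp]
    simp only [collectDigits, List.reverse_cons, scanDigits_append]
    have hmod0 : 0 ≤ PySem.Int.mod (p - 1) 4 := PySem.Int.mod_nonneg _ (by norm_num)
    have hmod4 : PySem.Int.mod (p - 1) 4 < 4 := PySem.Int.mod_lt _ (by norm_num)
    have hd : PySem.Int.mod (p - 1) 4 = 0 ∨ PySem.Int.mod (p - 1) 4 = 1 ∨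
        PySem.Int.mod (p - 1) 4 = 2 ∨ PySem.Int.mod (p - 1) 4 = 3 := by omega
    rcases scanDigits_cases ((collectDigits k (PySem.Int.floordiv (p - 1) 4)).reverse) with h | h | h <;>
      rw [h]
    · simp
    · simp
    -- remaining "Rr" case: A's child_idx branch versus B's digit test
    · rcases hd with h0 | h0 | h0 | h0 <;> rw [h0] <;> simp

lemma per_query (n p : Int) (h1 : 1 ≤ n) :
    findTraitGo n.toNat n p = scanDigits ((collectDigits (n - 1).toNat (p - 1)).reverse) := by
  obtain ⟨k, hk⟩ : ∃ k : Nat, n = (k : Int) + 1 := ⟨(n - 1).toNat, by omega⟩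
  have h1' : n.toNat = k + 1 := by omega
  have h2' : (n - 1).toNat = k := by omega
  rw [h1', h2', hk, findTrait_eq_scan]

-- ===== VERDICT (by name: the statement is the Claim_ definition above) =====
theorem solution_spec : Claim_equal_solution := by
  intro queries _ hpre
  unfold Spec_solution solution solution_alt
  apply List.map_congr_left
  intro q hq
  exact per_query q.1 q.2 (hpre q hq).1
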